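-- pv_equiv track=rewrite | github.com/kaushiklj/python_scripts | reactant_reactions.py | compare_reactions
-- ===== SOURCE A (Python) =====
-- def compare_reactions(r1,p1,r2,p2):
--     #negative value means reactions dont match
--     #positive value means reactions match
--     nr1 = len(r1)
--     np1 = len(p1)
--
--     nr2 = len(r2)
--     np2 = len(p2)
--
--     rflag = [None]* nr1
--     pflag = [None]* np1
--
--     for i1 in range(0,nr1):
--         rflag[i1] = 0
--     for i1 in range(0,np1):
--         pflag[i1] = 0
--
--     if (nr1 != nr2 or np1 != np2):
--         return -10
--
--     #Start comparing reactants
--     count1 = 0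
--     for i1 in range(0,nr1):
--         for i2 in range(0,nr2):
--             if (r1[i1] == r2[i2] and rflag[i2] == 0):
--                 count1 = count1 + 1
--                 rflag[i2] = 1
--                 break
--
--     #Start comparing products
--     count2 = 0
--     for i1 in range(0,np1):
--         for i2 in range(0,np2):
--             if (p1[i1] == p2[i2] and pflag[i2] == 0):
--                 count2 = count2 + 1
--                 pflag[i2] = 1
--                 break
--
--     #Check if the reactions match
--     if (count1 == nr1 and count2 == np1):
--         return 10
--     else:
--         return -10
-- ===== SOURCE B (Python) =====
-- def compare_reactions(r1, p1, r2, p2):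
--     # canonical-form comparison: the reactions match iff the reactant lists
--     # are permutations of each other and likewise the product lists
--     if sorted(r1) == sorted(r2) and sorted(p1) == sorted(p2):
--         return 10
--     return -10
-- ===== Notes on version B (the rewrite author's own statement) =====
-- stated objective: faster
-- what changed: Replaces the flag-array greedy O(n^2) nested-scan matching with a canonical sort-and-compare: return 10 iff sorted(r1)==sorted(r2) and sorted(p1)==sorted(p2), else -10; the explicit length check is absorbed because lists of different length never sort-compare equal.
import Mathlib
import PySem

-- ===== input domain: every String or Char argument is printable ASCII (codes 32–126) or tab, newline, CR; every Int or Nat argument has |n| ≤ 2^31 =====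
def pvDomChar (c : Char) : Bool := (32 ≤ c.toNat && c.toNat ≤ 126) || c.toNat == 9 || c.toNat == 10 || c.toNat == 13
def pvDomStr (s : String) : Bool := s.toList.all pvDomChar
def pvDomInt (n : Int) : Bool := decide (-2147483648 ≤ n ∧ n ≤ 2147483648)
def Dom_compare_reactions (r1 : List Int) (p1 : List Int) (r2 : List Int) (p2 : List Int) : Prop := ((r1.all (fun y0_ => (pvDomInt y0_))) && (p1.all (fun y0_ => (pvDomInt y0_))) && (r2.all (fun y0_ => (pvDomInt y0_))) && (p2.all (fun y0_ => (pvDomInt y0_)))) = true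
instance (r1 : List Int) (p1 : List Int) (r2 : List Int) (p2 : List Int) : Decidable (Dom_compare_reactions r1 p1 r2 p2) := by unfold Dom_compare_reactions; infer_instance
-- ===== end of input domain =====

-- B replaces A's flag-array greedy nested-scan matching with a canonical sort-and-compare (objective: simpler).

-- ===== PORT A =====
-- rflag = [None]*n; for i1 in range(0,n): rflag[i1] = 0
def pvInitFlags (n : Nat) : List (Option Int) :=
  (List.range n).foldl (fun f i => f.set i (some 0)) (List.replicate n none)

-- the inner 'for i2 in range(0,len(ys)): if x == ys[i2] and flags[i2] == 0: flags[i2] = 1; break'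
-- rendered as structural recursion over ys and flags in lockstep (indices are always in range);
-- returns the updated flag list on a match (the 'break'), none if the scan falls through
def pvScanA (x : Int) : List Int → List (Option Int) → Option (List (Option Int))
  | [], _ => none
  | _ :: _, [] => none
  | y :: ys, f :: fs =>
    if x = y ∧ f = some 0 then some (some 1 :: fs)
    else (pvScanA x ys fs).map (fun fs' => f :: fs')

-- the outer 'for i1 in range(0,n)' loop carrying (count, flags)
def pvLoopA (ys : List Int) : List Int → Int × List (Option Int) → Int × List (Option Int)
  | [], s => s
  | x :: xs, (c, fs) =>
    match pvScanA x ys fs with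
    | some fs' => pvLoopA ys xs (c + 1, fs')
    | none => pvLoopA ys xs (c, fs)

def compare_reactions (r1 : List Int) (p1 : List Int) (r2 : List Int) (p2 : List Int) : Int :=
  let nr1 := r1.length
  let np1 := p1.length
  let nr2 := r2.length
  let np2 := p2.length
  let rflag := pvInitFlags nr1
  let pflag := pvInitFlags np1
  if nr1 ≠ nr2 ∨ np1 ≠ np2 then -10
  else
    let count1 := (pvLoopA r2 r1 (0, rflag)).1
    let count2 := (pvLoopA p2 p1 (0, pflag)).1
    if count1 = (nr1 : Int) ∧ count2 = (np1 : Int) then 10 else -10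

-- ===== PORT B =====
def compare_reactions_alt (r1 : List Int) (p1 : List Int) (r2 : List Int) (p2 : List Int) : Int :=
  if PySem.List.sorted r1 (fun x => x) false = PySem.List.sorted r2 (fun x => x) false ∧
     PySem.List.sorted p1 (fun x => x) false = PySem.List.sorted p2 (fun x => x) false
  then 10 else -10

-- ===== PRECONDITION & SPEC =====
def Spec_compare_reactions (r1 : List Int) (p1 : List Int) (r2 : List Int) (p2 : List Int) (out : Int) : Prop := out = compare_reactions_alt r1 p1 r2 p2
instance (r1 : List Int) (p1 : List Int) (r2 : List Int) (p2 : List Int) (out : Int) : Decidable (Spec_compare_reactions r1 p1 r2 p2 out) := by unfold Spec_compare_reactions; infer_instance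

-- ===== CLAIM (what is proved, stated in full; the proofs are below) =====
def Claim_equal_compare_reactions : Prop := ∀ (r1 : List Int) (p1 : List Int) (r2 : List Int) (p2 : List Int), Dom_compare_reactions r1 p1 r2 p2 → Spec_compare_reactions r1 p1 r2 p2 (compare_reactions r1 p1 r2 p2)

-- ===== LEMMAS AND PROOFS =====

-- the positions of ys still available for matching (flag = 0)
def pvAvail : List Int → List (Option Int) → List Int
  | y :: ys, f :: fs => if f = some 0 then y :: pvAvail ys fs else pvAvail ys fs
  | _, _ => []

-- pure model of the greedy loop's count
def pvG : List Int → List Int → Int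
  | [], _ => 0
  | x :: xs, rem => if x ∈ rem then 1 + pvG xs (rem.erase x) else pvG xs rem

theorem pvInitFlags_aux (v : Option Int) (idxs : List Nat) (z : Option Int) (t : List (Option Int)) :
    idxs.foldl (fun f i => f.set (i + 1) v) (z :: t) = z :: idxs.foldl (fun f i => f.set i v) t := by
  induction idxs generalizing t with
  | nil => rfl
  | cons i is ih => simpa [List.foldl_cons] using ih (t.set i v)

theorem pvInitFlags_eq_replicate_aux (l : List (Option Int)) :
    (List.range l.length).foldl (fun f i => f.set i (some (0 : Int))) l
      = List.replicate l.length (some 0) := by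
  induction l with
  | nil => rfl
  | cons a t ih =>
    simp only [List.length_cons, List.range_succ_eq_map, List.foldl_cons, List.foldl_map,
      List.set]
    rw [pvInitFlags_aux]
    simp [ih, List.replicate_succ]

theorem pvInitFlags_eq (n : Nat) : pvInitFlags n = List.replicate n (some 0) := by
  have := pvInitFlags_eq_replicate_aux (List.replicate n (none : Option Int))
  simpa [pvInitFlags] using this

theorem pvAvail_replicate (ys : List Int) : pvAvail ys (List.replicate ys.length (some 0)) = ys := by
  induction ys with
  | nil => rfl
  | cons y t ih => simp [pvAvail, List.replicate_succ, ih]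

theorem pvScanA_none_iff (x : Int) (ys : List Int) (fs : List (Option Int)) :
    pvScanA x ys fs = none ↔ x ∉ pvAvail ys fs := by
  induction ys generalizing fs with
  | nil => cases fs <;> simp [pvScanA, pvAvail]
  | cons y t ih =>
    cases fs with
    | nil => simp [pvScanA, pvAvail]
    | cons f fs =>
      by_cases hm : x = y ∧ f = some 0
      · simp [pvScanA, pvAvail, hm]
      · simp only [pvScanA, if_neg hm, Option.map_eq_none_iff, ih]
        by_cases hf : f = some 0
        · have hxy : x ≠ y := fun h => hm ⟨h, hf⟩
          simp [pvAvail, hf, hxy]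
        · simp [pvAvail, hf]

theorem pvScanA_some (x : Int) (ys : List Int) (fs fs' : List (Option Int))
    (h : pvScanA x ys fs = some fs') :
    pvAvail ys fs' = (pvAvail ys fs).erase x := by
  induction ys generalizing fs fs' with
  | nil => cases fs <;> simp [pvScanA] at h
  | cons y t ih =>
    cases fs with
    | nil => simp [pvScanA] at h
    | cons f fs =>
      by_cases hm : x = y ∧ f = some 0
      · simp only [pvScanA, if_pos hm, Option.some_inj] at h
        subst h
        simp [pvAvail, hm.2, hm.1, List.erase_cons_head]
      · simp only [pvScanA, if_neg hm, Option.map_eq_some_iff] at h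
        obtain ⟨g, hg, rfl⟩ := h
        by_cases hf : f = some 0
        · have hxy : x ≠ y := fun h' => hm ⟨h', hf⟩
          simp [pvAvail, hf, ih _ _ hg, List.erase_cons_tail,
            (by simpa using hxy.symm : ¬ (y == x) = true)]
        · simp [pvAvail, hf, ih _ _ hg]

theorem pvLoopA_count (ys : List Int) (xs : List Int) :
    ∀ (c : Int) (fs : List (Option Int)),
      (pvLoopA ys xs (c, fs)).1 = c + pvG xs (pvAvail ys fs) := by
  induction xs with
  | nil => intro c fs; simp [pvLoopA, pvG]
  | cons x t ih =>
    intro c fs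
    cases h : pvScanA x ys fs with
    | none =>
      have hx : x ∉ pvAvail ys fs := (pvScanA_none_iff x ys fs).mp h
      simp [pvLoopA, h, pvG, hx, ih]
    | some fs' =>
      have hx : x ∈ pvAvail ys fs := by
        by_contra hc
        rw [← pvScanA_none_iff] at hc
        simp [h] at hc
      have he := pvScanA_some x ys fs fs' h
      simp only [pvLoopA, h, ih, pvG, if_pos hx, he]
      ring

theorem pvG_le (xs rem : List Int) : pvG xs rem ≤ (xs.length : Int) := by
  induction xs generalizing rem with
  | nil => simp [pvG]
  | cons x t ih =>
    simp only [pvG, List.length_cons]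
    split_ifs
    · have := ih (rem.erase x); push_cast; omega
    · have := ih rem; push_cast; omega

theorem pvG_eq_length_iff (xs rem : List Int) :
    pvG xs rem = (xs.length : Int) ↔ (xs : Multiset Int) ≤ (rem : Multiset Int) := by
  induction xs generalizing rem with
  | nil => simp [pvG]
  | cons x t ih =>
    by_cases hx : x ∈ rem
    · have hrem : (x ::ₘ ((rem : Multiset Int).erase x)) = (rem : Multiset Int) :=
        Multiset.cons_erase (by simpa using hx)
      constructor
      · intro h
        simp only [pvG, if_pos hx, List.length_cons] at h
        have ht : pvG t (rem.erase x) = (t.length : Int) := by push_cast at h ⊢; omega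
        have := (ih (rem.erase x)).mp ht
        calc ((x :: t : List Int) : Multiset Int) = x ::ₘ (t : Multiset Int) := by simp
          _ ≤ x ::ₘ ((rem : Multiset Int).erase x) := by
              refine Multiset.cons_le_cons _ ?_
              simpa [Multiset.coe_erase] using this
          _ = (rem : Multiset Int) := hrem
      · intro h
        have hle : (t : Multiset Int) ≤ ((rem : Multiset Int).erase x) := by
          rw [← hrem] at h
          have : x ::ₘ (t : Multiset Int) ≤ x ::ₘ ((rem : Multiset Int).erase x) := by
            simpa using h
          exact (Multiset.cons_le_cons_iff x).mp this
        have ht : pvG t (rem.erase x) = (t.length : Int) :=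
          (ih (rem.erase x)).mpr (by simpa [Multiset.coe_erase] using hle)
        simp only [pvG, if_pos hx, List.length_cons, ht]
        push_cast; ring
    · constructor
      · intro h
        exfalso
        simp only [pvG, if_neg hx, List.length_cons] at h
        have := pvG_le t rem
        push_cast at h; omega
      · intro h
        exfalso
        have : x ∈ (rem : Multiset Int) :=
          Multiset.mem_of_le h (by simp)
        exact hx (by simpa using this)

-- the greedy-loop count equals the length iff the lists are permutations (given equal lengths)
theorem pvCount_eq_iff (xs ys : List Int) (hlen : xs.length = ys.length) :
    (pvLoopA ys xs (0, pvInitFlags xs.length)).1 = (xs.length : Int) ↔ xs.Perm ys := by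
  rw [pvLoopA_count, pvInitFlags_eq, hlen, pvAvail_replicate]
  rw [zero_add, ← hlen, pvG_eq_length_iff]
  constructor
  · intro h
    have heq : (xs : Multiset Int) = (ys : Multiset Int) :=
      Multiset.eq_of_le_of_card_le h (by simpa using hlen.ge)
    exact Multiset.coe_eq_coe.mp heq
  · intro h
    exact le_of_eq (Multiset.coe_eq_coe.mpr h)

theorem pvSortedEq_iff (xs ys : List Int) :
    PySem.List.sorted xs (fun x => x) false = PySem.List.sorted ys (fun x => x) false ↔ xs.Perm ys :=
  PySem.List.sorted_id_eq_sorted_id_iff_perm xs ys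

-- ===== VERDICT (by name: the statement is the Claim_ definition above) =====
theorem compare_reactions_spec : Claim_equal_compare_reactions := by
  unfold Claim_equal_compare_reactions
  intro r1 p1 r2 p2 _
  unfold Spec_compare_reactions compare_reactions compare_reactions_alt
  by_cases hlen : r1.length ≠ r2.length ∨ p1.length ≠ p2.length
  · rw [if_pos hlen]
    rw [if_neg]
    rintro ⟨hr, hp⟩
    rcases hlen with h | h
    · exact h ((pvSortedEq_iff r1 r2).mp hr).length_eq
    · exact h ((pvSortedEq_iff p1 p2).mp hp).length_eq
  · rw [if_neg hlen]
    push Not at hlen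
    obtain ⟨hr, hp⟩ := hlen
    simp only [pvCount_eq_iff r1 r2 hr, pvCount_eq_iff p1 p2 hp,
      pvSortedEq_iff]
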